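-- pv_equiv track=rewrite | github.com/Exaltead/SceneClassifier | Classification/datesetter.py | _get_number_of_train_and_test_samples
-- ===== SOURCE A (Python) =====
-- def _get_number_of_train_and_test_samples(rec_tree, test_locations) ->(int,int):
--     train_samples = 0
--     test_samples = 0
--     for rec_type, locations in rec_tree.items():
--         for loc, loc_samples in locations.items():
--             if loc in test_locations[rec_type]:
--                 test_samples += len(loc_samples)
--             else:
--                 train_samples += len(loc_samples)
--     return train_samples, test_samples
-- ===== SOURCE B (Python) =====
-- def _get_number_of_train_and_test_samples(rec_tree, test_locations) ->(int,int):
--     total = sum(len(loc_samples)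
--                 for locations in rec_tree.values()
--                 for loc_samples in locations.values())
--     test_samples = sum(len(loc_samples)
--                        for rec_type, locations in rec_tree.items()
--                        for loc, loc_samples in locations.items()
--                        if loc in test_locations[rec_type])
--     return total - test_samples, test_samples
-- ===== Notes on version B (the rewrite author's own statement) =====
-- stated objective: alternative
-- what changed: B replaces the two-accumulator else-branch loop by two sum() passes: a grand total of all sample lengths and a test-only sum, deriving the train count by subtraction.
-- outside the precondition, e.g. on _get_number_of_train_and_test_samples({'a': {'x': [1]}}, {}): A raises KeyError, B raises KeyError
import Mathlib
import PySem

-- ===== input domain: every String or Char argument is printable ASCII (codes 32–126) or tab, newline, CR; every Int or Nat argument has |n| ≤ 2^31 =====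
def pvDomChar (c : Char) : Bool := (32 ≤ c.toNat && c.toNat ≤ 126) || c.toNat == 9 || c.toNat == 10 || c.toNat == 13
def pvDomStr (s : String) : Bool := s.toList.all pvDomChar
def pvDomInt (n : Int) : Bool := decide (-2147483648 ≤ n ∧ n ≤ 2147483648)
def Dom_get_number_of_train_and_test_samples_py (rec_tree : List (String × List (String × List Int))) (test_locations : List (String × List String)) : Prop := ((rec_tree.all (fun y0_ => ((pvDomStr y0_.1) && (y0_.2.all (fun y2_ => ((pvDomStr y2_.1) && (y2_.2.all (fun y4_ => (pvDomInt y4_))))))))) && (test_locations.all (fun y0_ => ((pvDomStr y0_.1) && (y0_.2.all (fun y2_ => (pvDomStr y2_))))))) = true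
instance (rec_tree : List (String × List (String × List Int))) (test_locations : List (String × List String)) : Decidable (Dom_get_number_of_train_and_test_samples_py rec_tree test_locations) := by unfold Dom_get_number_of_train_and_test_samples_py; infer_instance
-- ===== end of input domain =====

-- B computes a grand total of all sample lengths and a test-only sum in two sum() passes,
-- deriving the train count by subtraction instead of A's two-accumulator else-branch loop (objective: alternative).

-- first-match association-list lookup, exact for Python's test_locations[rec_type] wherever it does not raise
def pvLookup (test_locations : List (String × List String)) (k : String) : List String :=
  match test_locations.find? (fun p => p.1 == k) with
  | some p => p.2
  | none => []

-- ===== PORT A =====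
-- A's single nested loop with two accumulators (train, test)
def pvStepA (test_locations : List (String × List String)) (rec_type : String)
    (st : Int × Int) (lp : String × List Int) : Int × Int :=
  if (pvLookup test_locations rec_type).contains lp.1
  then (st.1, st.2 + (lp.2.length : Int))
  else (st.1 + (lp.2.length : Int), st.2)

def get_number_of_train_and_test_samples_py (rec_tree : List (String × List (String × List Int))) (test_locations : List (String × List String)) : Int × Int :=
  rec_tree.foldl (fun st p => p.2.foldl (pvStepA test_locations p.1) st) (0, 0)

-- ===== PORT B =====
-- sum(len(loc_samples) for locations in rec_tree.values() for loc_samples in locations.values())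
def pvTotal (rec_tree : List (String × List (String × List Int))) : Int :=
  rec_tree.foldl (fun acc p => p.2.foldl (fun a lp => a + (lp.2.length : Int)) acc) 0

-- sum(... if loc in test_locations[rec_type])
def pvTestSum (rec_tree : List (String × List (String × List Int))) (test_locations : List (String × List String)) : Int :=
  rec_tree.foldl (fun acc p =>
    p.2.foldl (fun a lp =>
      if (pvLookup test_locations p.1).contains lp.1 then a + (lp.2.length : Int) else a) acc) 0

def get_number_of_train_and_test_samples_py_alt (rec_tree : List (String × List (String × List Int))) (test_locations : List (String × List String)) : Int × Int :=
  (pvTotal rec_tree - pvTestSum rec_tree test_locations, pvTestSum rec_tree test_locations)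

-- ===== PRECONDITION & SPEC =====
-- Pre_ excludes exactly the inputs on which Python A raises KeyError: some rec_type with a
-- nonempty locations dict is missing from test_locations (B raises KeyError there too).
def Pre_get_number_of_train_and_test_samples_py (rec_tree : List (String × List (String × List Int))) (test_locations : List (String × List String)) : Prop :=
  (rec_tree.all (fun p => p.2.isEmpty || (test_locations.map Prod.fst).contains p.1)) = true
instance (rec_tree : List (String × List (String × List Int))) (test_locations : List (String × List String)) : Decidable (Pre_get_number_of_train_and_test_samples_py rec_tree test_locations) := by unfold Pre_get_number_of_train_and_test_samples_py; infer_instance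

def pvWitness_get_number_of_train_and_test_samples_py : (List (String × List (String × List Int))) × (List (String × List String)) :=
  ([("a", [("x", [1, 2]), ("y", [3])]), ("b", [("x", [4])])], [("a", ["x"]), ("b", [])])

def Spec_get_number_of_train_and_test_samples_py (rec_tree : List (String × List (String × List Int))) (test_locations : List (String × List String)) (out : Int × Int) : Prop := out = get_number_of_train_and_test_samples_py_alt rec_tree test_locations
instance (rec_tree : List (String × List (String × List Int))) (test_locations : List (String × List String)) (out : Int × Int) : Decidable (Spec_get_number_of_train_and_test_samples_py rec_tree test_locations out) := by unfold Spec_get_number_of_train_and_test_samples_py; infer_instance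

-- ===== CLAIM (what is proved, stated in full; the proofs are below) =====
def Claim_equal_get_number_of_train_and_test_samples_py : Prop := ∀ (rec_tree : List (String × List (String × List Int))) (test_locations : List (String × List String)), Dom_get_number_of_train_and_test_samples_py rec_tree test_locations → Pre_get_number_of_train_and_test_samples_py rec_tree test_locations → Spec_get_number_of_train_and_test_samples_py rec_tree test_locations (get_number_of_train_and_test_samples_py rec_tree test_locations)

-- ===== LEMMAS AND PROOFS =====
-- helper functions for the proofs
def pvTe (test_locations : List (String × List String)) (rt : String) (lp : String × List Int) : Int :=
  if (pvLookup test_locations rt).contains lp.1 then (lp.2.length : Int) else 0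
def pvLen (lp : String × List Int) : Int := (lp.2.length : Int)

theorem pv_sum_sub {α : Type} (l : List α) (f g : α → Int) :
    (l.map (fun x => f x - g x)).sum = (l.map f).sum - (l.map g).sum := by
  induction l with
  | nil => simp
  | cons x xs ih => simp [ih]; ring

theorem pv_innerA (test_locations : List (String × List String)) (rt : String)
    (locs : List (String × List Int)) (st : Int × Int) :
    locs.foldl (pvStepA test_locations rt) st
      = (st.1 + (locs.map (fun lp => pvLen lp - pvTe test_locations rt lp)).sum,
         st.2 + (locs.map (pvTe test_locations rt)).sum) := by
  induction locs generalizing st with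
  | nil => simp
  | cons lp rest ih =>
    simp only [List.foldl_cons, List.map_cons, List.sum_cons, ih]
    unfold pvStepA pvTe pvLen
    split_ifs <;> simp <;> ring

theorem pv_A (rec_tree : List (String × List (String × List Int))) (test_locations : List (String × List String)) (st : Int × Int) :
    rec_tree.foldl (fun st p => p.2.foldl (pvStepA test_locations p.1) st) st
      = (st.1 + (rec_tree.map (fun p => (p.2.map (fun lp => pvLen lp - pvTe test_locations p.1 lp)).sum)).sum,
         st.2 + (rec_tree.map (fun p => (p.2.map (pvTe test_locations p.1)).sum)).sum) := by
  induction rec_tree generalizing st with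
  | nil => simp
  | cons p rest ih =>
    rw [List.foldl_cons, ih, pv_innerA]
    simp only [List.map_cons, List.sum_cons, Prod.mk.injEq]
    constructor <;> ring

theorem pv_innerTot (locs : List (String × List Int)) (acc : Int) :
    locs.foldl (fun a lp => a + (lp.2.length : Int)) acc = acc + (locs.map pvLen).sum := by
  induction locs generalizing acc with
  | nil => simp
  | cons lp rest ih => simp [ih, pvLen]; ring

theorem pv_total (rec_tree : List (String × List (String × List Int))) (acc : Int) :
    rec_tree.foldl (fun acc p => p.2.foldl (fun a lp => a + (lp.2.length : Int)) acc) acc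
      = acc + (rec_tree.map (fun p => (p.2.map pvLen).sum)).sum := by
  induction rec_tree generalizing acc with
  | nil => simp
  | cons p rest ih => rw [List.foldl_cons, ih, pv_innerTot]; simp only [List.map_cons, List.sum_cons]; ring

theorem pv_innerTest (test_locations : List (String × List String)) (rt : String)
    (locs : List (String × List Int)) (acc : Int) :
    locs.foldl (fun a lp => if (pvLookup test_locations rt).contains lp.1 then a + (lp.2.length : Int) else a) acc
      = acc + (locs.map (pvTe test_locations rt)).sum := by
  induction locs generalizing acc with
  | nil => simp
  | cons lp rest ih =>
    simp only [List.foldl_cons, List.map_cons, List.sum_cons, ih]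
    unfold pvTe; split_ifs <;> ring

theorem pv_test (rec_tree : List (String × List (String × List Int))) (test_locations : List (String × List String)) (acc : Int) :
    rec_tree.foldl (fun acc p =>
        p.2.foldl (fun a lp => if (pvLookup test_locations p.1).contains lp.1 then a + (lp.2.length : Int) else a) acc) acc
      = acc + (rec_tree.map (fun p => (p.2.map (pvTe test_locations p.1)).sum)).sum := by
  induction rec_tree generalizing acc with
  | nil => simp
  | cons p rest ih => rw [List.foldl_cons, ih, pv_innerTest]; simp only [List.map_cons, List.sum_cons]; ring

-- ===== VERDICT (by name: the statement is the Claim_ definition above) =====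
theorem get_number_of_train_and_test_samples_py_spec : Claim_equal_get_number_of_train_and_test_samples_py := by
  intro rec_tree test_locations _ _
  unfold Spec_get_number_of_train_and_test_samples_py
  unfold get_number_of_train_and_test_samples_py get_number_of_train_and_test_samples_py_alt pvTotal pvTestSum
  rw [pv_A, pv_total, pv_test]
  simp only [Prod.mk.injEq]
  refine ⟨?_, by simp⟩
  rw [show (fun (p : String × List (String × List Int)) => (p.2.map (fun lp => pvLen lp - pvTe test_locations p.1 lp)).sum)
          = (fun p => (p.2.map pvLen).sum - (p.2.map (pvTe test_locations p.1)).sum) from funext (fun p => pv_sum_sub _ _ _)]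
  rw [pv_sum_sub]
  simp
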